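-- pv_equiv track=rewrite | github.com/anaelle-p/MWE_coref | OFCORS/statistiques.py | span_schema
-- ===== SOURCE A (Python) =====
-- def span_schema(schema):
--     """
--     Récupère les identifiant de début et de fin des éléments d'un schéma.
--
--     Args:
--         schema(liste de str)
--     Returns:
--         liste_ind (liste de liste de int): les identifiants de début et de fin
--         pour chaque partie
--         ex: [*, 1, 1, *] -> [[1,2]]
--             [1, *, 1, 1] -> [[0,0], [2,3]]
--     """
--     encours = False
--     liste_ind = []
--     for indice, element in enumerate(schema):
--         if element != "*" and not encours:
--             # L'élément vient de commencer
--             encours = True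
--             debut = indice
--         elif element == "*" and encours:
--             # l'élément vient de se finir
--             encours = False
--             fin = indice - 1
--             liste_ind.append([debut, fin])
--
--     return liste_ind
-- ===== SOURCE B (Python) =====
-- def span_schema(schema):
--     """
--     Start/end indices of the non-'*' runs of schema (a run that reaches the
--     end of the list without a following '*' is not reported, as in A).
--     """
--     starts = [i for i, (p, c) in enumerate(zip(["*"] + schema, schema))
--               if c != "*" and p == "*"]
--     ends = [i for i, (c, nx) in enumerate(zip(schema, schema[1:]))
--             if c != "*" and nx == "*"]
--     return [[s, e] for s, e in zip(starts, ends)]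
-- ===== Notes on version B (the rewrite author's own statement) =====
-- stated objective: alternative
-- what changed: Replaces the stateful encours-flag scan with two comprehensions that read run starts (non-star preceded by star) and run ends (non-star followed by star) from the list zipped with its shifts, then zips the two index lists; the truncating zip reproduces A's rule of dropping a run that reaches the end.
import Mathlib
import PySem

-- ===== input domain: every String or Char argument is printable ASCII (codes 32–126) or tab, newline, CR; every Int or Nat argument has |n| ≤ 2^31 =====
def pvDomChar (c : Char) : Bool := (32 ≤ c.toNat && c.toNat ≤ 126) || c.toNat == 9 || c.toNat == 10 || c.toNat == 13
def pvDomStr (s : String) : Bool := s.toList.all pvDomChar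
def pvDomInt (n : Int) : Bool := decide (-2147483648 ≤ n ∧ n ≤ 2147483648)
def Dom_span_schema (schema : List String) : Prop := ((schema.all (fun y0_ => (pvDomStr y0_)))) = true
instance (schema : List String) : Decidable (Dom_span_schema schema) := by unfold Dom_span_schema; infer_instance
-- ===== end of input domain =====

-- B replaces A's stateful flag scan by start/end index comprehensions over the
-- list zipped with its shifts, zipped together (alternative decomposition, same cost).

-- ===== PORT A =====
-- A's loop body, one enumerate step on the state (encours, debut, liste_ind)
def pvStepA (s : Bool × Int × List (List Int)) (p : Int × String) : Bool × Int × List (List Int) :=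
  if p.2 != "*" && !s.1 then (true, p.1, s.2.2)
  else if p.2 == "*" && s.1 then (false, s.2.1, s.2.2 ++ [[s.2.1, p.1 - 1]])
  else s

def span_schema (schema : List String) : List (List Int) :=
  ((PySem.List.enumerate schema 0).foldl pvStepA (false, 0, [])).2.2

-- ===== PORT B =====
def span_schema_alt (schema : List String) : List (List Int) :=
  let starts := ((PySem.List.enumerate (List.zip ("*" :: schema) schema) 0).filter
      (fun q => q.2.2 != "*" && q.2.1 == "*")).map (·.1)
  let ends := ((PySem.List.enumerate (List.zip schema (schema.drop 1)) 0).filter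
      (fun q => q.2.1 != "*" && q.2.2 == "*")).map (·.1)
  (starts.zip ends).map (fun p => [p.1, p.2])

-- ===== PRECONDITION & SPEC =====
def Spec_span_schema (schema : List String) (out : List (List Int)) : Prop := out = span_schema_alt schema
instance (schema : List String) (out : List (List Int)) : Decidable (Spec_span_schema schema out) := by unfold Spec_span_schema; infer_instance

-- ===== CLAIM (what is proved, stated in full; the proofs are below) =====
def Claim_equal_span_schema : Prop := ∀ (schema : List String), Dom_span_schema schema → Spec_span_schema schema (span_schema schema)

-- ===== LEMMAS AND PROOFS =====

-- run starts of xs at offset i, given the element preceding xs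
def pvStarts (prev : String) (xs : List String) (i : Int) : List Int :=
  match xs with
  | [] => []
  | x :: t => (if x ≠ "*" ∧ prev = "*" then [i] else []) ++ pvStarts x t (i + 1)

-- run ends read off consecutive pairs of xs, first pair indexed i
def pvEnds (xs : List String) (i : Int) : List Int :=
  match xs with
  | x :: y :: t => (if x ≠ "*" ∧ y = "*" then [i] else []) ++ pvEnds (y :: t) (i + 1)
  | _ => []

def pvMk (ss es : List Int) : List (List Int) := (ss.zip es).map (fun p => [p.1, p.2])

lemma pvFoldA_eq (xs : List String) : ∀ (prev : String) (debut i : Int) (acc : List (List Int)),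
    ((PySem.List.enumerate xs i).foldl pvStepA (prev != "*", debut, acc)).2.2
      = acc ++ pvMk (if prev = "*" then pvStarts prev xs i else debut :: pvStarts prev xs i)
                   (pvEnds (prev :: xs) (i - 1)) := by
  induction xs with
  | nil =>
    intro prev debut i acc
    by_cases hp : prev = "*" <;> simp [hp, PySem.List.enumerate, pvStarts, pvEnds, pvMk]
  | cons x t ih =>
    intro prev debut i acc
    rw [PySem.List.enumerate_cons, List.foldl_cons]
    by_cases hp : prev = "*" <;> by_cases hx : x = "*"
    · -- prev = "*", x = "*": no branch fires
      subst hp; subst hx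
      rw [show pvStepA (("*" != "*" : Bool), debut, acc) (i, "*") = (("*" != "*" : Bool), debut, acc) from rfl,
          ih "*" debut (i + 1) acc]
      simp [pvStarts, pvEnds]
    · -- prev = "*", x ≠ "*": a run starts at i
      subst hp
      have e2 : ((x != "*" : Bool)) = true := by simp [hx]
      have hs : pvStepA (("*" != "*" : Bool), debut, acc) (i, x) = (true, i, acc) := by
        simp [pvStepA, hx]
      rw [hs]
      have h2 := ih x i (i + 1) acc
      rw [e2] at h2; rw [h2]
      simp [hx, pvStarts, pvEnds, pvMk]
    · -- prev ≠ "*", x = "*": the open run ends at i - 1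
      subst hx
      have e1 : ((prev != "*" : Bool)) = true := by simp [hp]
      have hs : pvStepA (true, debut, acc) (i, "*") = (false, debut, acc ++ [[debut, i - 1]]) := by
        simp [pvStepA]
      rw [e1, hs]
      have h2 := ih "*" debut (i + 1) (acc ++ [[debut, i - 1]])
      rw [show (("*" : String) != "*") = false from rfl] at h2
      rw [h2]
      simp [hp, pvStarts, pvEnds, pvMk, show i + 1 - 1 = i from by omega]
    · -- prev ≠ "*", x ≠ "*": the run continues
      have e1 : ((prev != "*" : Bool)) = true := by simp [hp]
      have e2 : ((x != "*" : Bool)) = true := by simp [hx]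
      have hs : pvStepA (true, debut, acc) (i, x) = (true, debut, acc) := by
        simp [pvStepA, hx]
      rw [e1, hs]
      have h2 := ih x debut (i + 1) acc
      rw [e2] at h2; rw [h2]
      simp [hp, hx, pvStarts, pvEnds]

lemma pvStarts_eq (xs : List String) : ∀ (prev : String) (i : Int),
    ((PySem.List.enumerate (List.zip (prev :: xs) xs) i).filter
        (fun q => q.2.2 != "*" && q.2.1 == "*")).map (·.1) = pvStarts prev xs i := by
  induction xs with
  | nil => intro prev i; simp [PySem.List.enumerate, pvStarts]
  | cons x t ih =>
    intro prev i
    rw [show List.zip (prev :: x :: t) (x :: t) = (prev, x) :: List.zip (x :: t) t from rfl,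
        PySem.List.enumerate_cons, List.filter_cons]
    have h2 := ih x (i + 1)
    by_cases hx : x = "*"
    · subst hx
      by_cases hp : prev = "*" <;> simp only [pvStarts, hp] <;> simp [hp, h2]
    · by_cases hp : prev = "*" <;> simp only [pvStarts, hp, hx] <;> simp [hp, hx, h2]

lemma pvEnds_eq (xs : List String) : ∀ (i : Int),
    ((PySem.List.enumerate (List.zip xs (xs.drop 1)) i).filter
        (fun q => q.2.1 != "*" && q.2.2 == "*")).map (·.1) = pvEnds xs i := by
  induction xs with
  | nil => intro i; simp [PySem.List.enumerate, pvEnds]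
  | cons x t ih =>
    intro i
    match t, ih with
    | [], _ => simp [PySem.List.enumerate, pvEnds]
    | y :: t', ih =>
      rw [show List.zip (x :: y :: t') ((x :: y :: t').drop 1) = (x, y) :: List.zip (y :: t') (t'.drop 0) from rfl,
          PySem.List.enumerate_cons, List.filter_cons]
      have h2 := ih (i + 1)
      simp only [List.drop_one, List.tail_cons] at h2
      by_cases hy : y = "*"
      · subst hy
        by_cases hx : x = "*" <;> simp only [pvEnds, hx] <;> simp [hx, h2]
      · by_cases hx : x = "*" <;> simp only [pvEnds, hx, hy] <;> simp [hx, hy, h2]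

-- ===== VERDICT (by name: the statement is the Claim_ definition above) =====
theorem span_schema_spec : Claim_equal_span_schema := by
  intro schema _
  unfold Spec_span_schema span_schema span_schema_alt
  have h := pvFoldA_eq schema "*" 0 0 []
  rw [show (("*" : String) != "*") = false from rfl, if_pos rfl] at h
  rw [h, pvStarts_eq schema "*" 0, pvEnds_eq schema 0]
  have he : pvEnds ("*" :: schema) (0 - 1) = pvEnds schema 0 := by
    cases schema with
    | nil => rfl
    | cons y t =>
      cases t with
      | nil => rfl
      | cons z t2 => simp [pvEnds]
  rw [he]
  simp [pvMk]
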